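-- pv_equiv track=rewrite | github.com/TurnNetwork/turn-sdk.py | bubble/middleware/filter.py | gen_bounded_segments
-- ===== SOURCE A (Python) =====
-- from typing import (
--     TYPE_CHECKING,
--     Any,
--     AsyncIterable,
--     AsyncIterator,
--     Callable,
--     Dict,
--     Generator,
--     Iterable,
--     Iterator,
--     List,
--     Optional,
--     Tuple,
--     Union,
--     cast,
-- )
--
-- def gen_bounded_segments(start: int, stop: int, step: int) -> Iterable[Tuple[int, int]]:
--     #  If the initial range is less than the step
--     #  just return (start, stop)
--     if start + step >= stop:
--         yield (start, stop)
--         return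
--     for segment in zip(
--         range(start, stop - step + 1, step), range(start + step, stop + 1, step)
--     ):
--         yield segment
--
--     remainder = (stop - start) % step
--     #  Handle the remainder
--     if remainder:
--         yield (stop - remainder, stop)
-- ===== SOURCE B (Python) =====
-- def gen_bounded_segments(start, stop, step):
--     #  March a single cursor forward, emitting one full segment per
--     #  iteration; the final yield covers the (possibly short) tail,
--     #  which also handles the case where the whole range fits one step.
--     while start + step < stop:
--         yield (start, start + step)
--         start += step
--     yield (start, stop)
-- ===== Notes on version B (the rewrite author's own statement) =====
-- stated objective: simpler
-- what changed: B is a single-cursor accumulator loop: it marches start forward by step, yielding one segment per iteration, and a final yield (start, stop) covers both the short tail and the whole-range-fits case, eliminating A's two parallel offset ranges, the zip pass, the modulo-remainder branch and the separate guard.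
-- outside the precondition, e.g. on gen_bounded_segments(0, 5, -2): A returns [(6, 5)], B does not finish within the time limit; on gen_bounded_segments(0, 5, 0): A raises ValueError, B does not finish within the time limit
import Mathlib
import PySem

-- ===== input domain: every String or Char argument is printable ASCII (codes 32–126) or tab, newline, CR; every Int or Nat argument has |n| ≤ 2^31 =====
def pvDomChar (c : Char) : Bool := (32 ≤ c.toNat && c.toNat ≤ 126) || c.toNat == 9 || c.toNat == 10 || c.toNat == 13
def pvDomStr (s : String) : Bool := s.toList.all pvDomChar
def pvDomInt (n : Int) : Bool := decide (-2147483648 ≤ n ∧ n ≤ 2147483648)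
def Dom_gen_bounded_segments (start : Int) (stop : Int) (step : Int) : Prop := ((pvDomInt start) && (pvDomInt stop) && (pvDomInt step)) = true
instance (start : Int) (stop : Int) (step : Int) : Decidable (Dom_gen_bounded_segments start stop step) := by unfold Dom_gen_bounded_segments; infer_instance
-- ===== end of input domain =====

-- B replaces A's guard, two offset ranges, zip pass and modulo-remainder branch by a single
-- cursor loop: yield one segment per iteration, final yield covers the tail (objective: simpler).

-- ===== PORT A =====
def gen_bounded_segments (start : Int) (stop : Int) (step : Int) : List (Int × Int) :=
  if start + step ≥ stop then [(start, stop)]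
  else
    let segs := List.zip (PySem.List.pyRange start (stop - step + 1) step)
                         (PySem.List.pyRange (start + step) (stop + 1) step)
    let remainder := PySem.Int.mod (stop - start) step
    if remainder ≠ 0 then segs ++ [(stop - remainder, stop)] else segs

-- ===== PORT B =====
-- Transliteration of Source B's while loop as the obvious recursion on its state (start).
-- The 'else []' branch is only a totality guard: with step ≤ 0 and start + step < stop
-- the Python loop diverges (outside Pre_).
def gen_bounded_segments_alt (start : Int) (stop : Int) (step : Int) : List (Int × Int) :=
  if start + step < stop then
    if _h : 1 ≤ step then
      (start, start + step) :: gen_bounded_segments_alt (start + step) stop step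
    else []
  else [(start, stop)]
termination_by (stop - start).toNat
decreasing_by omega

-- ===== PRECONDITION & SPEC =====
-- Pre_ excludes non-positive step with start + step < stop: there step = 0 makes A raise
-- ValueError (range step 0), and step < 0 makes A return an accidental inverted segment
-- produced by Python's negative-divisor modulo, while B's loop diverges — outside the
-- function's natural domain of a positive segment step.
def Pre_gen_bounded_segments (start : Int) (stop : Int) (step : Int) : Prop :=
  1 ≤ step ∨ stop ≤ start + step
instance (start : Int) (stop : Int) (step : Int) : Decidable (Pre_gen_bounded_segments start stop step) := by unfold Pre_gen_bounded_segments; infer_instance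
def pvWitness_gen_bounded_segments : Int × Int × Int := (0, 10, 3)
def Spec_gen_bounded_segments (start : Int) (stop : Int) (step : Int) (out : List (Int × Int)) : Prop := out = gen_bounded_segments_alt start stop step
instance (start : Int) (stop : Int) (step : Int) (out : List (Int × Int)) : Decidable (Spec_gen_bounded_segments start stop step out) := by unfold Spec_gen_bounded_segments; infer_instance

-- ===== CLAIM (what is proved, stated in full; the proofs are below) =====
def Claim_equal_gen_bounded_segments : Prop := ∀ (start : Int) (stop : Int) (step : Int), Dom_gen_bounded_segments start stop step → Pre_gen_bounded_segments start stop step → Spec_gen_bounded_segments start stop step (gen_bounded_segments start stop step)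

-- ===== LEMMAS AND PROOFS =====

-- range(a, b, s) for 0 < s: empty when b ≤ a, else a :: range(a+s, b, s)
theorem pyRange_pos_nil (a b s : Int) (hs : 0 < s) (h : b ≤ a) :
    PySem.List.pyRange a b s = [] := by
  rw [PySem.List.pyRange_of_pos _ _ hs]
  simp [show ¬ a < b by omega]

theorem pyRange_pos_cons (a b s : Int) (hs : 0 < s) (h : a < b) :
    PySem.List.pyRange a b s = a :: PySem.List.pyRange (a + s) b s := by
  rw [PySem.List.pyRange_of_pos _ _ hs, PySem.List.pyRange_of_pos _ _ hs]
  by_cases h2 : a + s < b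
  · have hq : (b - a + s - 1) / s = (b - (a + s) + s - 1) / s + 1 := by
      have := Int.add_mul_ediv_right (b - (a + s) + s - 1) 1 (show s ≠ 0 by omega)
      have he : b - a + s - 1 = b - (a + s) + s - 1 + 1 * s := by ring
      rw [he, this]
    have hq0 : 0 ≤ (b - (a + s) + s - 1) / s :=
      Int.ediv_nonneg (by omega) (by omega)
    rw [if_pos h, if_pos h2, hq]
    have ht : ((b - (a + s) + s - 1) / s + 1).toNat = ((b - (a + s) + s - 1) / s).toNat + 1 := by
      omega
    rw [ht, List.range_succ_eq_map]
    simp only [List.map_cons, List.map_map]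
    refine congrArg₂ _ (by simp) (List.map_congr_left ?_)
    intro k _
    simp [Function.comp, Nat.succ_eq_add_one]
    ring
  · -- exactly one element: b ≤ a + s
    have hq : (b - a + s - 1) / s = 1 := by
      have h1 : 1 * s ≤ b - a + s - 1 := by omega
      have h2' : b - a + s - 1 < 2 * s := by omega
      have hle : 1 ≤ (b - a + s - 1) / s := Int.le_ediv_of_mul_le (by omega) h1
      have hlt : (b - a + s - 1) / s < 2 := Int.ediv_lt_of_lt_mul (by omega) (by omega)
      omega
    rw [if_pos h, if_neg h2, hq]
    simp

theorem A_step (start stop step : Int) (hs : 1 ≤ step) (h2 : start + step < stop) :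
    gen_bounded_segments start stop step =
      (start, start + step) :: gen_bounded_segments (start + step) stop step := by
  have hm : PySem.Int.mod (stop - start) step = PySem.Int.mod (stop - (start + step)) step := by
    rw [PySem.Int.mod_eq_emod_of_pos (by omega), PySem.Int.mod_eq_emod_of_pos (by omega)]
    conv_lhs => rw [show stop - start = stop - (start + step) + 1 * step by ring]
    rw [Int.add_mul_emod_self_right]
  simp only [gen_bounded_segments]
  rw [pyRange_pos_cons start (stop - step + 1) step (by omega) (by omega),
      pyRange_pos_cons (start + step) (stop + 1) step (by omega) (by omega)]
  rw [if_neg (show ¬ (start + step ≥ stop) from by omega)]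
  by_cases h3 : stop ≤ start + step + step
  · rw [if_pos (show start + step + step ≥ stop from by omega)]
    by_cases h4 : start + step + step = stop
    · -- the last segment is full: remainder 0
      rw [pyRange_pos_cons (start + step) (stop - step + 1) step (by omega) (by omega),
          pyRange_pos_nil (start + step + step) (stop - step + 1) step (by omega) (by omega),
          pyRange_pos_cons (start + step + step) (stop + 1) step (by omega) (by omega),
          pyRange_pos_nil (start + step + step + step) (stop + 1) step (by omega) (by omega)]
      have hr : PySem.Int.mod (stop - start) step = 0 := by
        rw [PySem.Int.mod_eq_emod_of_pos (by omega),
            show stop - start = 2 * step by omega, Int.mul_emod_left]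
      simp [hr]
      omega
    · -- a proper remainder: the zip part is empty
      rw [pyRange_pos_nil (start + step) (stop - step + 1) step (by omega) (by omega)]
      have hr : PySem.Int.mod (stop - start) step = stop - start - step := by
        rw [hm, PySem.Int.mod_eq_emod_of_pos (by omega),
            Int.emod_eq_of_lt (by omega) (by omega)]
        ring
      simp [hr]
      rw [if_neg (show ¬ (stop - start - step = 0) from by omega)]
      simp only [List.cons.injEq, Prod.mk.injEq, true_and, and_true]
      omega
  · rw [if_neg (show ¬ (start + step + step ≥ stop) from by omega), hm]
    by_cases hr : PySem.Int.mod (stop - (start + step)) step = 0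
    · simp [hr]
    · simp [hr]

theorem main_equal (step : Int) (hs : 1 ≤ step) : ∀ (n : Nat) (start stop : Int),
    stop - start ≤ (n : Int) →
    gen_bounded_segments start stop step = gen_bounded_segments_alt start stop step := by
  intro n
  induction n with
  | zero =>
    intro s t h
    unfold gen_bounded_segments gen_bounded_segments_alt
    rw [if_pos (by omega), if_neg (show ¬ s + step < t by omega)]
  | succ n ih =>
    intro s t h
    by_cases hg : s + step ≥ t
    · unfold gen_bounded_segments gen_bounded_segments_alt
      rw [if_pos hg, if_neg (show ¬ s + step < t by omega)]
    · have hg' : s + step < t := by omega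
      rw [A_step s t step hs hg']
      conv_rhs => rw [gen_bounded_segments_alt]
      rw [if_pos hg', dif_pos hs, ih (s + step) t (by omega)]

-- ===== VERDICT =====
theorem gen_bounded_segments_spec : Claim_equal_gen_bounded_segments := by
  intro start stop step _ hpre
  unfold Spec_gen_bounded_segments
  rcases hpre with hs | hg
  · exact main_equal step hs (stop - start).toNat start stop (by omega)
  · unfold gen_bounded_segments gen_bounded_segments_alt
    rw [if_pos (by omega), if_neg (show ¬ start + step < stop by omega)]
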